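-- pv_equiv track=rewrite | github.com/dictation-toolbox/unimacro | iban.py | invalid_part
-- ===== SOURCE A (Python) =====
-- def invalid_part(form_list, iban_part):
--     """Check if syntax of the part of IBAN is invalid."""
--     for lng, typ in form_list:
--         if lng > len(iban_part):
--             lng = len(iban_part)
--         for ch in iban_part[:lng]:
--             a = ("A" <= ch <= "Z")
--             n = ch.isdigit()
--             c = n or a or ("a" <= ch <= "z")
--             if (not c and typ == "c") or \
--                (not a and typ == "a") or \
--                (not n and typ == "n"):
--                 return 1
--         iban_part = iban_part[lng:]
--     return 0
-- ===== SOURCE B (Python) =====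
-- def invalid_part(form_list, iban_part):
--     """Check if syntax of the part of IBAN is invalid."""
--     # Build a flat table of the expected type code for each character position,
--     # then verify the string against it in a single pass.
--     types = []
--     rem = len(iban_part)
--     for lng, typ in form_list:
--         cnt = max(0, min(lng, rem))
--         types.extend([typ] * cnt)
--         rem -= cnt
--     for ch, typ in zip(iban_part, types):
--         a = ("A" <= ch <= "Z")
--         n = ch.isdigit()
--         c = n or a or ("a" <= ch <= "z")
--         if (not c and typ == "c") or (not a and typ == "a") or (not n and typ == "n"):
--             return 1
--     return 0
-- ===== Notes on version B (the rewrite author's own statement) =====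
-- stated objective: alternative
-- what changed: Replaces the nested slice-consuming segment loop with a precomputed flat table of expected type codes followed by a single zip pass; Pre_ excludes form lists containing a negative segment length, outside the task's natural domain, where A's Python negative-slice behaviour is an implementation accident.
-- outside the precondition, e.g. on invalid_part([(-1, 'n')], 'ab'): A returns 1, B returns 0
import Mathlib
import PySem

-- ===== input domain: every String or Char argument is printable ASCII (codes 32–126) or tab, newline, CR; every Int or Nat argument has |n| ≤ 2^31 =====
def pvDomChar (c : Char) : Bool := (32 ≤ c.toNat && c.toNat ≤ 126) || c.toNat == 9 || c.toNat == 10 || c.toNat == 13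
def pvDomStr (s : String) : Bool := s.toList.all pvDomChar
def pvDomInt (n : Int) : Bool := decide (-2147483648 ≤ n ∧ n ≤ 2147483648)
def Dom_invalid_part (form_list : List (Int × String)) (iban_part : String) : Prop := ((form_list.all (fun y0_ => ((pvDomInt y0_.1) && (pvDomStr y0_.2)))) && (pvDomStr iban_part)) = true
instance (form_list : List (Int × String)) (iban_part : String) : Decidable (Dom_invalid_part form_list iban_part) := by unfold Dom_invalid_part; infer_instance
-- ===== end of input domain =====

-- ===== PORT A =====
-- B replaces A's nested slice-consuming segment loop by a precomputed flat
-- table of expected type codes plus a single zip pass (objective: alternative).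

-- inner 'for ch in iban_part[:lng]' loop of A: true = a violating char found (return 1)
def pvA_seg : List Char → String → Bool
  | [], _ => false
  | ch :: rest, typ =>
    let a := decide ('A' ≤ ch ∧ ch ≤ 'Z')
    let n := PySem.Chars.isdigit ch
    let c := n || a || decide ('a' ≤ ch ∧ ch ≤ 'z')
    if (!c && typ == "c") || (!a && typ == "a") || (!n && typ == "n") then true
    else pvA_seg rest typ

-- outer 'for lng, typ in form_list' loop of A, consuming the string by slices
def pvA_go : List (Int × String) → List Char → Int
  | [], _ => 0
  | (lng, typ) :: rest, s =>
    let lng := if lng > (s.length : Int) then (s.length : Int) else lng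
    if pvA_seg (PySem.List.slice s none (some lng)) typ then 1
    else pvA_go rest (PySem.List.slice s (some lng) none)

def invalid_part (form_list : List (Int × String)) (iban_part : String) : Int :=
  pvA_go form_list iban_part.toList

-- ===== PORT B =====
-- first loop of B: the flat table of expected type codes ('types'), rem = remaining budget
def pvB_types : List (Int × String) → Int → List String
  | [], _ => []
  | (lng, typ) :: rest, rem =>
    let cnt := max 0 (min lng rem)
    List.replicate cnt.toNat typ ++ pvB_types rest (rem - cnt)

-- second loop of B: 'for ch, typ in zip(iban_part, types)'
def pvB_check : List (Char × String) → Int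
  | [] => 0
  | (ch, typ) :: rest =>
    let a := decide ('A' ≤ ch ∧ ch ≤ 'Z')
    let n := PySem.Chars.isdigit ch
    let c := n || a || decide ('a' ≤ ch ∧ ch ≤ 'z')
    if (!c && typ == "c") || (!a && typ == "a") || (!n && typ == "n") then 1
    else pvB_check rest

def invalid_part_alt (form_list : List (Int × String)) (iban_part : String) : Int :=
  pvB_check (iban_part.toList.zip (pvB_types form_list (iban_part.toList.length : Int)))

-- ===== PRECONDITION & SPEC =====
-- Pre_ excludes form lists containing a negative segment length: such lengths are
-- outside the natural domain of a format description, and A's behaviour there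
-- (Python negative-slice indexing from the end) is an implementation accident.
def Pre_invalid_part (form_list : List (Int × String)) (iban_part : String) : Prop :=
  ∀ p ∈ form_list, 0 ≤ p.1
instance (form_list : List (Int × String)) (iban_part : String) : Decidable (Pre_invalid_part form_list iban_part) := by unfold Pre_invalid_part; infer_instance

def pvWitness_invalid_part : (List (Int × String)) × String := ([(2, "n"), (3, "a")], "12ABC")

def Spec_invalid_part (form_list : List (Int × String)) (iban_part : String) (out : Int) : Prop := out = invalid_part_alt form_list iban_part
instance (form_list : List (Int × String)) (iban_part : String) (out : Int) : Decidable (Spec_invalid_part form_list iban_part out) := by unfold Spec_invalid_part; infer_instance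

-- ===== CLAIM (what is proved, stated in full; the proofs are below) =====
def Claim_equal_invalid_part : Prop := ∀ (form_list : List (Int × String)) (iban_part : String), Dom_invalid_part form_list iban_part → Pre_invalid_part form_list iban_part → Spec_invalid_part form_list iban_part (invalid_part form_list iban_part)

-- ===== LEMMAS AND PROOFS =====

-- checking a prefix against a constant type table = A's inner segment loop
lemma pvB_check_replicate (typ : String) :
    ∀ (l : List Char) (tail : List (Char × String)),
      pvB_check (l.zip (List.replicate l.length typ) ++ tail) =
        if pvA_seg l typ then 1 else pvB_check tail := by
  intro l
  induction l with
  | nil => intro tail; simp [pvA_seg]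
  | cons ch cs ih =>
    intro tail
    simp only [List.length_cons, List.replicate_succ, List.zip_cons_cons, List.cons_append,
      pvB_check, pvA_seg]
    split
    · rfl
    · exact ih tail

-- one step of both programs: the same cut count c for A's slices and B's table segment
lemma pv_step (lng : Int) (hlng : 0 ≤ lng) (typ : String) (rest : List (Int × String)) (s : List Char) :
    ∃ c : Nat, c ≤ s.length ∧
      PySem.List.slice s none (some (if lng > (s.length : Int) then (s.length : Int) else lng)) = s.take c ∧
      PySem.List.slice s (some (if lng > (s.length : Int) then (s.length : Int) else lng)) none = s.drop c ∧
      pvB_types ((lng, typ) :: rest) (s.length : Int) =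
        List.replicate c typ ++ pvB_types rest (((s.length - c : Nat) : Int)) := by
  by_cases hgt : lng > (s.length : Int)
  · refine ⟨s.length, le_refl _, ?_, ?_, ?_⟩
    · simp [hgt, PySem.List.slice_to_natCast]
    · simp [hgt, PySem.List.slice_from_natCast]
    · simp only [pvB_types]
      have hm : max 0 (min lng (s.length : Int)) = (s.length : Int) := by omega
      rw [hm]
      have : ((s.length : Int)).toNat = s.length := by omega
      rw [this, show ((s.length : Int) - (s.length : Int)) = (((s.length - s.length : Nat)) : Int) from by omega]
  · refine ⟨lng.toNat, by omega, ?_, ?_, ?_⟩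
    · rw [if_neg hgt, PySem.List.slice_to s hlng]
    · rw [if_neg hgt, PySem.List.slice_from s hlng]
    · simp only [pvB_types]
      have hm : max 0 (min lng (s.length : Int)) = lng := by omega
      rw [hm, show ((s.length : Int) - lng) = (((s.length - lng.toNat : Nat)) : Int) from by omega]

lemma pv_main : ∀ (fl : List (Int × String)) (s : List Char),
    (∀ p ∈ fl, 0 ≤ p.1) →
    pvA_go fl s = pvB_check (s.zip (pvB_types fl (s.length : Int))) := by
  intro fl
  induction fl with
  | nil => intro s _; simp [pvA_go, pvB_types, pvB_check]
  | cons p rest ih =>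
    intro s hpre
    obtain ⟨lng, typ⟩ := p
    have hlng : 0 ≤ lng := hpre _ (List.mem_cons_self ..)
    obtain ⟨c, hc, hTake, hDrop, hTypes⟩ := pv_step lng hlng typ rest s
    rw [hTypes]
    have hsplit : s.zip (List.replicate c typ ++ pvB_types rest (((s.length - c : Nat) : Int))) =
        (s.take c).zip (List.replicate c typ) ++
          (s.drop c).zip (pvB_types rest (((s.length - c : Nat) : Int))) := by
      have hlenr : (s.take c).length = (List.replicate c typ).length := by
        simp only [List.length_take, List.length_replicate]; omega
      have h := List.zip_append (r₁ := s.drop c)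
        (r₂ := pvB_types rest (((s.length - c : Nat) : Int))) hlenr
      rw [List.take_append_drop] at h
      exact h
    rw [hsplit]
    have hlen : (s.take c).length = c := by simp [hc]
    have hrepl := pvB_check_replicate typ (s.take c)
      ((s.drop c).zip (pvB_types rest (((s.length - c : Nat) : Int))))
    rw [hlen] at hrepl
    rw [hrepl]
    simp only [pvA_go, hTake, hDrop]
    split
    · rfl
    · rw [ih (s.drop c) (fun q hq => hpre q (List.mem_cons_of_mem _ hq))]
      congr 2
      simp [hc]

-- ===== VERDICT (by name: the statement is the Claim_ definition above) =====
theorem invalid_part_spec : Claim_equal_invalid_part := by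
  intro form_list iban_part _ hpre
  unfold Spec_invalid_part invalid_part invalid_part_alt
  exact pv_main form_list iban_part.toList hpre
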